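-- pv_equiv track=rewrite | github.com/shazilk-dev/Digital-FTE-Autonomous-AI-Employee-Hackathon-0- | scripts/utils/dashboard_updater.py | _rebuild_table
-- ===== SOURCE A (Python) =====
-- def _rebuild_table(headers: list[str], rows: list[list[str]]) -> str:
--     """
--     Rebuild a Markdown table from headers and rows.
--     Includes the |---|---| separator. Pads columns for alignment.
--     """
--     if not headers:
--         return ""
--
--     n = len(headers)
--
--     def normalize(row: list[str]) -> list[str]:
--         r = list(row)
--         while len(r) < n:
--             r.append("")
--         return r[:n]
--
--     norm_headers = normalize(headers)
--     norm_rows = [normalize(r) for r in rows]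
--
--     col_widths = [max(len(h), 3) for h in norm_headers]
--     for row in norm_rows:
--         for i, cell in enumerate(row):
--             col_widths[i] = max(col_widths[i], len(cell))
--
--     def fmt(cells: list[str]) -> str:
--         return "| " + " | ".join(c.ljust(col_widths[i]) for i, c in enumerate(cells)) + " |"
--
--     sep = "|" + "|".join("-" * (w + 2) for w in col_widths) + "|"
--     return "\n".join([fmt(norm_headers), sep] + [fmt(r) for r in norm_rows])
-- ===== SOURCE B (Python) =====
-- def _rebuild_table(headers: list[str], rows: list[list[str]]) -> str:
--     """Column-oriented rebuild: pad each column's cells up front (header + rows,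
--     missing cells default to ""), then transpose the padded columns with zip(*)
--     to obtain the finished lines; the separator cells are built alongside."""
--     if not headers:
--         return ""
--     table = [headers] + rows
--     cols = []
--     seps = []
--     for i in range(len(headers)):
--         cells = [r[i] if i < len(r) else "" for r in table]
--         w = max([3] + [len(c) for c in cells])
--         seps.append("-" * (w + 2))
--         cols.append([c + " " * (w - len(c)) for c in cells])
--     body = ["| " + " | ".join(cs) + " |" for cs in zip(*cols)]
--     sep_line = "|" + "|".join(seps) + "|"
--     return "\n".join(body[:1] + [sep_line] + body[1:])
-- ===== Notes on version B (the rewrite author's own statement) =====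
-- stated objective: alternative
-- what changed: B builds the table column-by-column: for each column it gathers the cells (header + rows, missing cells default to empty), pads them all to the column width immediately and builds the separator cell alongside, then obtains the finished lines by transposing the padded columns with zip(*cols); A instead normalizes every row, computes a widths array with a row-major running-max nested loop, and only then formats row by row with ljust.
import Mathlib
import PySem

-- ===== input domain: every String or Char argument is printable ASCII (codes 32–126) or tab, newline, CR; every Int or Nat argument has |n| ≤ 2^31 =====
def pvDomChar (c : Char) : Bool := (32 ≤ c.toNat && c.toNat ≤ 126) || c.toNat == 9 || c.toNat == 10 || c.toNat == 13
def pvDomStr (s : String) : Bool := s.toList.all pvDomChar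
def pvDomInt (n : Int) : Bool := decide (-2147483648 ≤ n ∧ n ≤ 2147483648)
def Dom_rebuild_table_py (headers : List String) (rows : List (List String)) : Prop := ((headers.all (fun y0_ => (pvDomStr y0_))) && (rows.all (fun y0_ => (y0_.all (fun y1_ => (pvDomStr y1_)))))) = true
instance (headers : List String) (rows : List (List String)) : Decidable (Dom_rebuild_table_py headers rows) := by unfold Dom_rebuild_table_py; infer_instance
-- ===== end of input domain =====

-- B pads each column's cells up front and transposes the padded columns (zip(*cols)) to get the
-- lines; A normalizes rows, computes widths by a row-major running max, then formats with ljust.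
-- Equal return value proved on all inputs; neither program mutates its arguments.

-- ===== PORT A =====

-- normalize's while-loop: append "" until len(r) >= n
def padA (n : Nat) (r : List String) : List String :=
  if r.length < n then padA n (r ++ [""]) else r
termination_by n - r.length
decreasing_by simp_all; omega

-- normalize(row) = padded copy truncated to n
def normA (n : Nat) (r : List String) : List String := (padA n r).take n

-- c.ljust(w): exact — pads with spaces on the right, never truncates (Nat subtraction clamps like ljust)
def ljustA (c : String) (w : Nat) : String := c ++ String.ofList (List.replicate (w - c.toList.length) ' ')

-- 'for i, cell in enumerate(row): col_widths[i] = max(col_widths[i], len(cell))'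
def bumpRowA (cw : List Nat) (row : List String) : List Nat :=
  (PySem.List.enumerate row).foldl
    (fun cw p => PySem.List.pySetD cw p.1 (max (PySem.List.pyGetD cw p.1 0) p.2.toList.length)) cw

-- fmt(cells)
def fmtA (cw : List Nat) (cells : List String) : String :=
  "| " ++ PySem.Str.join " | "
    ((PySem.List.enumerate cells).map (fun p => ljustA p.2 (PySem.List.pyGetD cw p.1 0))) ++ " |"

def rebuild_table_py (headers : List String) (rows : List (List String)) : String :=
  if headers = [] then "" else
    PySem.Str.join "\n"
      ([fmtA (((rows.map (normA headers.length)).foldl bumpRowA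
                ((normA headers.length headers).map (fun h => max h.toList.length 3))))
            (normA headers.length headers),
        "|" ++ PySem.Str.join "|"
          ((((rows.map (normA headers.length)).foldl bumpRowA
              ((normA headers.length headers).map (fun h => max h.toList.length 3))).map
            (fun w => String.ofList (List.replicate (w + 2) '-')))) ++ "|"]
       ++ (rows.map (normA headers.length)).map
            (fmtA (((rows.map (normA headers.length)).foldl bumpRowA
                ((normA headers.length headers).map (fun h => max h.toList.length 3))))))

-- ===== PORT B =====

-- one iteration of the column loop: append the separator cell to seps and the padded column to cols
--   cells = [r[i] if i < len(r) else "" for r in table];  w = max([3] + [len(c) for c in cells])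
def colStepB (table : List (List String)) (acc : List String × List (List String)) (i : Nat) :
    List String × List (List String) :=
  (acc.1 ++ [String.ofList (List.replicate
        (((table.map (fun r => r.getD i "")).map (fun c => c.toList.length)).foldl max 3 + 2) '-')],
   acc.2 ++ [(table.map (fun r => r.getD i "")).map
      (fun c => c ++ String.ofList (List.replicate
        (((table.map (fun r => r.getD i "")).map (fun c => c.toList.length)).foldl max 3
          - c.toList.length) ' '))])

-- zip(*cols): Python zip — stop as soon as any list is exhausted (zip of no lists is empty)
def zipStarB (ls : List (List String)) : List (List String) :=
  if h : ls = [] ∨ ls.any (·.isEmpty) then []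
  else (ls.map (fun l => l.headD "")) :: zipStarB (ls.map (fun l => l.tail))
termination_by (ls.headD []).length
decreasing_by
  push_neg at h
  obtain ⟨h1, h2⟩ := h
  cases ls with
  | nil => exact absurd rfl h1
  | cons a t =>
    simp only [List.any_cons, Bool.or_eq_true] at h2
    cases a with
    | nil => simp at h2
    | cons x xs => simp

def rebuild_table_py_alt (headers : List String) (rows : List (List String)) : String :=
  if headers = [] then "" else
    PySem.Str.join "\n"
      (((zipStarB ((List.range headers.length).foldl (colStepB (headers :: rows)) ([], [])).2).map
          (fun cs => "| " ++ PySem.Str.join " | " cs ++ " |")).take 1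
       ++ ["|" ++ PySem.Str.join "|"
              (((List.range headers.length).foldl (colStepB (headers :: rows)) ([], [])).1) ++ "|"]
       ++ ((zipStarB ((List.range headers.length).foldl (colStepB (headers :: rows)) ([], [])).2).map
          (fun cs => "| " ++ PySem.Str.join " | " cs ++ " |")).drop 1)

-- ===== PRECONDITION & SPEC =====
def Spec_rebuild_table_py (headers : List String) (rows : List (List String)) (out : String) : Prop := out = rebuild_table_py_alt headers rows
instance (headers : List String) (rows : List (List String)) (out : String) : Decidable (Spec_rebuild_table_py headers rows out) := by unfold Spec_rebuild_table_py; infer_instance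

-- ===== CLAIM (what is proved, stated in full; the proofs are below) =====
def Claim_equal_rebuild_table_py : Prop := ∀ (headers : List String) (rows : List (List String)), Dom_rebuild_table_py headers rows → Spec_rebuild_table_py headers rows (rebuild_table_py headers rows)

-- ===== LEMMAS AND PROOFS =====

theorem padA_eq (n : Nat) (r : List String) :
    padA n r = r ++ List.replicate (n - r.length) "" := by
  unfold padA
  split
  · rename_i h
    rw [padA_eq n (r ++ [""])]
    have h1 : n - r.length = (n - (r ++ [""]).length) + 1 := by simp; omega
    rw [h1, List.replicate_succ, List.append_assoc]
    rfl
  · rename_i h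
    have : n - r.length = 0 := by omega
    simp [this]
termination_by n - r.length
decreasing_by simp_all; omega

theorem normA_length (n : Nat) (r : List String) : (normA n r).length = n := by
  simp [normA, padA_eq]; omega

theorem normA_getD (n : Nat) (r : List String) (i : Nat) (hi : i < n) :
    (normA n r).getD i "" = r.getD i "" := by
  simp only [normA, padA_eq, List.getD_eq_getElem?_getD, List.getElem?_take, hi, if_pos]
  by_cases h : i < r.length
  · rw [List.getElem?_append_left h]
  · have h1 : i - r.length < n - r.length := by omega
    rw [List.getElem?_append_right (Nat.le_of_not_lt h), List.getElem?_replicate, if_pos h1,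
        List.getElem?_eq_none (Nat.le_of_not_lt h)]
    rfl

-- the enumerate/pySetD loop rewrites every index s, s+1, … once
theorem enumFoldA (row : List String) (cw : List Nat) (s : Nat) (hs : s + row.length ≤ cw.length) :
    (PySem.List.enumerate row (s : Int)).foldl
      (fun cw p => PySem.List.pySetD cw p.1 (max (PySem.List.pyGetD cw p.1 0) p.2.toList.length)) cw
    = cw.take s ++ List.zipWith (fun w c => max w c.toList.length) (cw.drop s) row
        ++ cw.drop (s + row.length) := by
  induction row generalizing cw s with
  | nil => simp [PySem.List.enumerate]
  | cons c cs ih =>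
    have hslt : s < cw.length := by simp at hs; omega
    have hcast : (s : Int) + 1 = ((s + 1 : Nat) : Int) := by push_cast; ring
    simp only [PySem.List.enumerate, List.foldl_cons]
    rw [hcast]
    rw [PySem.List.pySetD_natCast, PySem.List.pyGetD_natCast]
    rw [ih _ (s + 1) (by simp [List.length_set] at hs ⊢; omega)]
    rw [List.set_eq_take_cons_drop _ hslt]
    have hts : (cw.take s).length = s := by
      simp [List.length_take, Nat.min_eq_left hslt.le]
    have h1 : (cw.take s ++ max (cw.getD s 0) c.toList.length :: cw.drop (s + 1)).take (s + 1)
        = cw.take s ++ [max (cw.getD s 0) c.toList.length] := by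
      rw [List.take_append, hts, List.take_take]
      have e1 : min (s + 1) s = s := by omega
      have e2 : s + 1 - s = 1 := by omega
      rw [e1, e2]
      rfl
    have h2 : ∀ k, s + 1 ≤ k → (cw.take s ++ max (cw.getD s 0) c.toList.length :: cw.drop (s + 1)).drop k
        = cw.drop k := by
      intro k hk
      rw [List.drop_append, hts, List.drop_eq_nil_of_le (by rw [hts]; omega)]
      have e1 : k - s = (k - s - 1) + 1 := by omega
      rw [e1, List.nil_append, List.drop_succ_cons, List.drop_drop]
      congr 1
      omega
    rw [h1, h2 _ (le_refl _), h2 _ (by omega)]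
    rw [List.drop_eq_getElem_cons hslt, List.zipWith_cons_cons]
    rw [List.getD_eq_getElem _ _ hslt]
    simp only [List.append_assoc, List.cons_append]
    have h3 : s + (c :: cs).length = s + 1 + cs.length := by simp; omega
    rw [h3]
    simp

theorem bumpRowA_eq (cw : List Nat) (row : List String) (h : row.length = cw.length) :
    bumpRowA cw row = List.zipWith (fun w c => max w c.toList.length) cw row := by
  have h0 : ((0 : Nat) : Int) = (0 : Int) := rfl
  have := enumFoldA row cw 0 (by omega)
  rw [h0] at this
  simpa [bumpRowA, h] using this

theorem foldl_zw_length (rs : List (List String)) (init : List Nat)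
    (h : ∀ r ∈ rs, r.length = init.length) :
    (rs.foldl (fun cw row => List.zipWith (fun w c => max w c.toList.length) cw row) init).length
      = init.length := by
  induction rs generalizing init with
  | nil => rfl
  | cons r rs ih =>
    simp only [List.foldl_cons]
    rw [ih]
    · simp [List.length_zipWith, h r (by simp)]
    · intro r' hr'
      rw [List.length_zipWith, h r (by simp), Nat.min_self]
      exact h r' (by simp [hr'])

theorem foldl_bumpRowA_eq (rs : List (List String)) (init : List Nat)
    (h : ∀ r ∈ rs, r.length = init.length) :
    rs.foldl bumpRowA init
      = rs.foldl (fun cw row => List.zipWith (fun w c => max w c.toList.length) cw row) init := by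
  induction rs generalizing init with
  | nil => rfl
  | cons r rs ih =>
    simp only [List.foldl_cons]
    rw [bumpRowA_eq _ _ (h r (by simp))]
    refine ih _ ?_
    intro r' hr'
    rw [List.length_zipWith, h r (by simp), Nat.min_self]
    exact h r' (by simp [hr'])

theorem foldl_zw_getD (rs : List (List String)) (init : List Nat)
    (h : ∀ r ∈ rs, r.length = init.length) (i : Nat) (hi : i < init.length) :
    (rs.foldl (fun cw row => List.zipWith (fun w c => max w c.toList.length) cw row) init).getD i 0
    = rs.foldl (fun m r => max m (r.getD i "").toList.length) (init.getD i 0) := by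
  induction rs generalizing init with
  | nil => rfl
  | cons r rs ih =>
    simp only [List.foldl_cons]
    have hr : r.length = init.length := h r (by simp)
    have hlen : (List.zipWith (fun w c => max w c.toList.length) init r).length = init.length := by
      simp [List.length_zipWith, hr]
    rw [ih _ (by intro r' hr'; rw [hlen]; exact h r' (by simp [hr'])) (by omega)]
    congr 1
    rw [List.getD_eq_getElem _ _ (by omega), List.getElem_zipWith,
        List.getD_eq_getElem _ _ hi, List.getD_eq_getElem _ _ (by omega)]

theorem fmt_cells (cells : List String) (cw : List Nat) (s : Nat) :
    (PySem.List.enumerate cells (s : Int)).map (fun p => ljustA p.2 (PySem.List.pyGetD cw p.1 0))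
    = (List.range cells.length).map (fun k => ljustA (cells.getD k "") (cw.getD (s + k) 0)) := by
  induction cells generalizing s with
  | nil => simp [PySem.List.enumerate]
  | cons c cs ih =>
    have hcast : (s : Int) + 1 = ((s + 1 : Nat) : Int) := by push_cast; ring
    simp only [PySem.List.enumerate, List.map_cons, List.length_cons, List.range_succ_eq_map,
      PySem.List.pyGetD_natCast]
    rw [hcast, ih (s + 1)]
    simp only [List.map_map, Function.comp_def, List.getD_cons_zero, List.getD_cons_succ,
      Nat.add_zero]
    congr 1
    apply List.map_congr_left
    intro k _
    have e : s + (k + 1) = s + 1 + k := by omega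
    rw [e]

-- proof-side abbreviations for B's per-column data
def wBv (table : List (List String)) (i : Nat) : Nat :=
  ((table.map (fun r => r.getD i "")).map (fun c => c.toList.length)).foldl max 3

def sepFv (table : List (List String)) (i : Nat) : String :=
  String.ofList (List.replicate (wBv table i + 2) '-')

def colFv (table : List (List String)) (i : Nat) : List String :=
  (table.map (fun r => r.getD i "")).map
    (fun c => c ++ String.ofList (List.replicate (wBv table i - c.toList.length) ' '))

-- the column loop is two maps
theorem foldl_colStepB (table : List (List String)) (l : List Nat)
    (a : List String) (b : List (List String)) :
    l.foldl (colStepB table) (a, b) = (a ++ l.map (sepFv table), b ++ l.map (colFv table)) := by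
  induction l generalizing a b with
  | nil => simp
  | cons i t ih =>
    simp only [List.foldl_cons, List.map_cons]
    rw [show colStepB table (a, b) i = (a ++ [sepFv table i], b ++ [colFv table i]) from rfl, ih]
    simp

-- transpose of a nonempty list of columns of the shape table.map (g i)
theorem zipStarB_mapcols (g : Nat → List String → String) (ns : List Nat) (hne : ns ≠ [])
    (table : List (List String)) :
    zipStarB (ns.map (fun i => table.map (g i)))
      = table.map (fun r => ns.map (fun i => g i r)) := by
  induction table with
  | nil =>
    rw [zipStarB]
    rw [dif_pos]
    · simp
    · right
      cases ns with
      | nil => exact absurd rfl hne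
      | cons i t => simp
  | cons r ts ih =>
    rw [zipStarB]
    rw [dif_neg]
    · have hheads : (ns.map (fun i => (r :: ts).map (g i))).map (fun l => l.headD "")
          = ns.map (fun i => g i r) := by
        simp [List.map_map, Function.comp_def]
      have htails : (ns.map (fun i => (r :: ts).map (g i))).map (fun l => l.tail)
          = ns.map (fun i => ts.map (g i)) := by
        simp [List.map_map, Function.comp_def]
      rw [hheads, htails, ih]
      simp
    · push_neg
      constructor
      · simp [hne]
      · simp

-- A's widths list at index i equals B's per-column width
theorem widthsA_getD (headers : List String) (rows : List (List String)) (i : Nat)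
    (hi : i < headers.length) :
    ((rows.map (normA headers.length)).foldl bumpRowA
        ((normA headers.length headers).map (fun h => max h.toList.length 3))).getD i 0
      = wBv (headers :: rows) i := by
  set n := headers.length with hndef
  have hinitlen : ((normA n headers).map (fun h => max h.toList.length 3)).length = n := by
    simp [normA_length]
  have hmem : ∀ r ∈ rows.map (normA n), r.length
      = ((normA n headers).map (fun h => max h.toList.length 3)).length := by
    intro r hr
    rw [hinitlen]
    obtain ⟨r', _, rfl⟩ := List.mem_map.mp hr
    exact normA_length n r'
  rw [foldl_bumpRowA_eq _ _ hmem,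
      foldl_zw_getD _ _ hmem i (by rw [hinitlen]; exact hi)]
  have hseed : ((normA n headers).map (fun h => max h.toList.length 3)).getD i 0
      = max (headers.getD i "").toList.length 3 := by
    rw [List.getD_eq_getElem ((normA n headers).map (fun h => max h.toList.length 3)) 0
          (by rw [hinitlen]; exact hi), List.getElem_map,
        ← List.getD_eq_getElem (normA n headers) "" (by rw [normA_length]; exact hi),
        normA_getD _ _ _ hi]
  have hfun : (fun (m : Nat) (r : List String) => max m ((normA n r).getD i "").toList.length)
      = (fun m r => max m (r.getD i "").toList.length) := by
    funext m r
    rw [normA_getD _ _ _ hi]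
  rw [hseed, List.foldl_map, hfun]
  rw [wBv, List.map_map, List.foldl_map]
  simp only [Function.comp_def, List.foldl_cons]
  rw [Nat.max_comm]

theorem widthsA_length (headers : List String) (rows : List (List String)) :
    ((rows.map (normA headers.length)).foldl bumpRowA
        ((normA headers.length headers).map (fun h => max h.toList.length 3))).length
      = headers.length := by
  set n := headers.length
  have hinitlen : ((normA n headers).map (fun h => max h.toList.length 3)).length = n := by
    simp [normA_length]
  have hmem : ∀ r ∈ rows.map (normA n), r.length
      = ((normA n headers).map (fun h => max h.toList.length 3)).length := by
    intro r hr
    rw [hinitlen]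
    obtain ⟨r', _, rfl⟩ := List.mem_map.mp hr
    exact normA_length n r'
  rw [foldl_bumpRowA_eq _ _ hmem, foldl_zw_length _ _ hmem, hinitlen]

-- per-row line equality: A's fmt of the normalized row = B's padded transposed row, wrapped
theorem fmt_eq_lineB (headers : List String) (rows : List (List String)) (r : List String) :
    fmtA ((rows.map (normA headers.length)).foldl bumpRowA
        ((normA headers.length headers).map (fun h => max h.toList.length 3)))
      (normA headers.length r)
    = "| " ++ PySem.Str.join " | "
        ((List.range headers.length).map (fun i =>
          r.getD i "" ++ String.ofList
            (List.replicate (wBv (headers :: rows) i - (r.getD i "").toList.length) ' ')))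
      ++ " |" := by
  unfold fmtA
  have h0 : ((0 : Nat) : Int) = (0 : Int) := rfl
  have := fmt_cells (normA headers.length r)
    ((rows.map (normA headers.length)).foldl bumpRowA
      ((normA headers.length headers).map (fun h => max h.toList.length 3))) 0
  rw [h0] at this
  rw [this, normA_length]
  congr 2
  congr 1
  apply List.map_congr_left
  intro k hk
  rw [List.mem_range] at hk
  rw [Nat.zero_add, normA_getD headers.length r k hk, widthsA_getD headers rows k hk]
  rfl

-- ===== VERDICT (by name: the statement is the Claim_ definition above) =====
theorem rebuild_table_py_spec : Claim_equal_rebuild_table_py := by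
  intro headers rows _
  unfold Spec_rebuild_table_py rebuild_table_py rebuild_table_py_alt
  by_cases hne : headers = []
  · simp [hne]
  · rw [if_neg hne, if_neg hne]
    have hn : 0 < headers.length := List.length_pos_iff.mpr hne
    have hrange : List.range headers.length ≠ [] := by
      simp [List.range_eq_nil]; omega
    rw [foldl_colStepB]
    simp only [List.nil_append]
    have hcol : (List.range headers.length).map (colFv (headers :: rows))
        = (List.range headers.length).map (fun i => (headers :: rows).map (fun r =>
            r.getD i "" ++ String.ofList
              (List.replicate (wBv (headers :: rows) i - (r.getD i "").toList.length) ' '))) := by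
      apply List.map_congr_left
      intro i _
      simp [colFv, List.map_map, Function.comp_def]
    rw [hcol, zipStarB_mapcols
          (fun i r => r.getD i "" ++ String.ofList
            (List.replicate (wBv (headers :: rows) i - (r.getD i "").toList.length) ' '))
          _ hrange (headers :: rows)]
    simp only [List.map_cons, List.map_map, Function.comp_def, List.take_succ_cons,
      List.take_zero, List.drop_succ_cons, List.drop_zero]
    congr 1
    simp only [List.cons_append, List.singleton_append, List.nil_append]
    congr 1
    · -- header line
      exact fmt_eq_lineB headers rows headers
    congr 1
    · -- separator line
      have hsep : List.map (fun w => String.ofList (List.replicate (w + 2) '-'))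
            ((rows.map (normA headers.length)).foldl bumpRowA
              ((normA headers.length headers).map (fun h => max h.toList.length 3)))
          = (List.range headers.length).map (sepFv (headers :: rows)) := by
        apply List.ext_getElem
        · simp only [List.length_map, List.length_range, widthsA_length headers rows]
        · intro i hi1 hi2
          have hi : i < headers.length := by
            rw [List.length_map, widthsA_length headers rows] at hi1
            exact hi1
          rw [List.getElem_map, List.getElem_map, List.getElem_range]
          rw [← List.getD_eq_getElem _ 0 (by rw [widthsA_length headers rows]; exact hi),
              widthsA_getD headers rows i hi]
          rfl
      rw [hsep]
    · -- body lines
      apply List.map_congr_left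
      intro r _
      exact fmt_eq_lineB headers rows r
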